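-- pv_equiv track=rewrite | github.com/chethanone/OncoNutri | backend/fastapi_ml/utils/expanded_recommendations.py | categorize_dietary_type
-- ===== SOURCE A (Python) =====
-- def categorize_dietary_type(description: str) -> str:
--     """Categorize food into dietary types"""
--     desc_lower = description.lower()
--
--     if any(word in desc_lower for word in ['chicken', 'turkey', 'beef', 'pork', 'lamb', 'meat']):
--         return 'Non-Veg'
--     elif any(word in desc_lower for word in ['fish', 'salmon', 'tuna', 'shrimp', 'prawn', 'seafood']):
--         return 'Pescatarian'
--     elif 'egg' in desc_lower:
--         return 'Veg+Egg'
--     elif any(word in desc_lower for word in ['milk', 'cheese', 'paneer', 'yogurt', 'butter', 'cream']):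
--         return 'Pure Veg'
--     else:
--         return 'Vegan'
-- ===== SOURCE B (Python) =====
-- KEYWORD_PRIORITY = [
--     ("chicken", 0), ("turkey", 0), ("beef", 0), ("pork", 0), ("lamb", 0), ("meat", 0),
--     ("fish", 1), ("salmon", 1), ("tuna", 1), ("shrimp", 1), ("prawn", 1), ("seafood", 1),
--     ("egg", 2),
--     ("milk", 3), ("cheese", 3), ("paneer", 3), ("yogurt", 3), ("butter", 3), ("cream", 3),
-- ]
-- LABELS = ["Non-Veg", "Pescatarian", "Veg+Egg", "Pure Veg", "Vegan"]
--
--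
-- def categorize_dietary_type(description: str) -> str:
--     """Single left-to-right scan of the description: at each position, note the
--     best (lowest) priority of any keyword starting there; return that label."""
--     d = description.lower()
--     best = 4
--     for i in range(len(d)):
--         for kw, p in KEYWORD_PRIORITY:
--             if p < best and d.startswith(kw, i):
--                 best = p
--     return LABELS[best]
-- ===== Notes on version B (the rewrite author's own statement) =====
-- stated objective: alternative
-- what changed: Replaces A's priority cascade of whole-string substring searches by a single left-to-right scan over the positions of the lowercased description, keeping a best-priority-so-far accumulator over startswith tests against a flat (keyword, priority) table and indexing a label list at the end.
import Mathlib
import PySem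

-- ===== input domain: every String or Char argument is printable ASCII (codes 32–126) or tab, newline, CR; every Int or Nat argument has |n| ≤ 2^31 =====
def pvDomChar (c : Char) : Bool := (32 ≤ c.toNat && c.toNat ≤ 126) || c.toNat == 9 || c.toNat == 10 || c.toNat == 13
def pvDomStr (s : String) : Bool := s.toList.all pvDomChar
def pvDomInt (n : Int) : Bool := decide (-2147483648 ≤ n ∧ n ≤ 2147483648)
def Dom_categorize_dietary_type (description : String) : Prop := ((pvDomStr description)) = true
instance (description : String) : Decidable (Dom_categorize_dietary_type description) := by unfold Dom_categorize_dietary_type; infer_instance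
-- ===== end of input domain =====

-- B replaces A's cascade of substring searches by a single left-to-right scan over the
-- string positions keeping the best (lowest) matched keyword priority; objective: alternative.

-- ===== PORT A =====
def categorize_dietary_type (description : String) : String :=
  let desc_lower := PySem.Str.lower description
  if ["chicken", "turkey", "beef", "pork", "lamb", "meat"].any
      (fun word => PySem.Str.isIn word desc_lower) then "Non-Veg"
  else if ["fish", "salmon", "tuna", "shrimp", "prawn", "seafood"].any
      (fun word => PySem.Str.isIn word desc_lower) then "Pescatarian"
  else if PySem.Str.isIn "egg" desc_lower then "Veg+Egg"
  else if ["milk", "cheese", "paneer", "yogurt", "butter", "cream"].any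
      (fun word => PySem.Str.isIn word desc_lower) then "Pure Veg"
  else "Vegan"

-- ===== PORT B =====
def kwPriority : List (List Char × Nat) :=
  [("chicken".toList, 0), ("turkey".toList, 0), ("beef".toList, 0), ("pork".toList, 0),
   ("lamb".toList, 0), ("meat".toList, 0),
   ("fish".toList, 1), ("salmon".toList, 1), ("tuna".toList, 1), ("shrimp".toList, 1),
   ("prawn".toList, 1), ("seafood".toList, 1),
   ("egg".toList, 2),
   ("milk".toList, 3), ("cheese".toList, 3), ("paneer".toList, 3), ("yogurt".toList, 3),
   ("butter".toList, 3), ("cream".toList, 3)]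

def dietLabels : List String := ["Non-Veg", "Pescatarian", "Veg+Egg", "Pure Veg", "Vegan"]

def categorize_dietary_type_alt (description : String) : String :=
  let d := (PySem.Str.lower description).toList
  -- 'for i in range(len(d)): for kw, p in KEYWORD_PRIORITY: if p < best and d.startswith(kw, i): best = p'
  -- d.startswith(kw, i) with 0 ≤ i is exactly 'kw is a prefix of d[i:]'
  let best := (PySem.List.pyRange 0 (PySem.Chars.len d) 1).foldl
    (fun best i =>
      kwPriority.foldl
        (fun b kp => if kp.2 < b ∧ PySem.Chars.startswith (d.drop i.toNat) kp.1 then kp.2 else b)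
        best)
    4
  -- LABELS[best]: best ≤ 4 always, so Python's index is in range
  dietLabels.getD best "Vegan"

-- ===== PRECONDITION & SPEC =====
def Spec_categorize_dietary_type (description : String) (out : String) : Prop := out = categorize_dietary_type_alt description
instance (description : String) (out : String) : Decidable (Spec_categorize_dietary_type description out) := by unfold Spec_categorize_dietary_type; infer_instance

-- ===== CLAIM (what is proved, stated in full; the proofs are below) =====
def Claim_equal_categorize_dietary_type : Prop := ∀ (description : String), Dom_categorize_dietary_type description → Spec_categorize_dietary_type description (categorize_dietary_type description)

-- ===== LEMMAS AND PROOFS =====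

-- the inner keyword loop is a guarded min-fold: it computes the min of b and the
-- priorities of the keywords matching at this position
theorem foldl_guarded_min (L : List (List Char × Nat)) (p : List Char → Bool) (b : Nat) :
    L.foldl (fun b kp => if kp.2 < b ∧ p kp.1 then kp.2 else b) b
      = ((L.filter (fun kp => p kp.1)).map Prod.snd).foldl min b := by
  induction L generalizing b with
  | nil => rfl
  | cons kp rest ih =>
      by_cases h : p kp.1
      · simp [List.foldl_cons, h, ih]
        congr 1
        rw [Nat.min_def]; split_ifs <;> omega
      · simp [List.foldl_cons, h, ih]

-- a fold of min-folds is the min-fold of the concatenation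
theorem foldl_foldl_min (I : List Int) (g : Int → List Nat) (b : Nat) :
    I.foldl (fun b i => (g i).foldl min b) b = (I.flatMap g).foldl min b := by
  induction I generalizing b with
  | nil => rfl
  | cons a rest ih => simp [List.foldl_cons, List.flatMap_cons, List.foldl_append, ih]

theorem foldl_min_eq_or_mem (l : List Nat) (b : Nat) :
    l.foldl min b = b ∨ l.foldl min b ∈ l := by
  induction l generalizing b with
  | nil => exact Or.inl rfl
  | cons a rest ih =>
      simp only [List.foldl_cons]
      rcases ih (min b a) with h | h
      · rcases Nat.le_total b a with hba | hab
        · left; rw [h, Nat.min_eq_left hba]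
        · right; rw [h, Nat.min_eq_right hab]; exact List.mem_cons_self
      · right; exact List.mem_cons_of_mem _ h

theorem foldl_min_le (l : List Nat) (b : Nat) :
    l.foldl min b ≤ b ∧ ∀ v ∈ l, l.foldl min b ≤ v := by
  induction l generalizing b with
  | nil => exact ⟨Nat.le_refl b, by simp⟩
  | cons a rest ih =>
      obtain ⟨h1, h2⟩ := ih (min b a)
      refine ⟨le_trans h1 (Nat.min_le_left _ _), ?_⟩
      intro v hv
      rcases List.mem_cons.mp hv with rfl | hv
      · exact le_trans h1 (Nat.min_le_right _ _)
      · exact h2 v hv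

-- matched-at-some-position ↔ substring containment (keywords are nonempty)
theorem mem_flat_vals (d : List Char) (p : Nat) :
    (p ∈ (PySem.List.pyRange 0 (PySem.Chars.len d) 1).flatMap
        (fun i => ((kwPriority.filter
            (fun kp => PySem.Chars.startswith (d.drop i.toNat) kp.1)).map Prod.snd)))
      ↔ ∃ kw, (kw, p) ∈ kwPriority ∧ PySem.Chars.isIn kw d = true := by
  simp only [List.mem_flatMap, List.mem_map, List.mem_filter]
  constructor
  · rintro ⟨i, hi, ⟨kw, q⟩, ⟨hmem, hsw⟩, rfl⟩
    refine ⟨kw, hmem, ?_⟩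
    rw [← PySem.Chars.exists_prefix_drop_iff_isIn]
    exact ⟨i.toNat, (PySem.Chars.startswith_iff _ _).mp hsw⟩
  · rintro ⟨kw, hmem, hin⟩
    obtain ⟨j, hj⟩ := (PySem.Chars.exists_prefix_drop_iff_isIn kw d).mpr hin
    have hkw : kw ≠ [] := by
      clear hj hin; revert hmem
      unfold kwPriority
      intro hmem
      fin_cases hmem <;> simp_all
    have hjlt : j < d.length := by
      by_contra hge
      have : d.drop j = [] := List.drop_eq_nil_of_le (by omega)
      rw [this, List.prefix_nil] at hj
      exact hkw hj
    refine ⟨(j : Int), ?_, ⟨kw, p⟩, ⟨hmem, ?_⟩, rfl⟩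
    · rw [PySem.List.mem_pyRange_one]
      constructor
      · exact Int.natCast_nonneg j
      · simp [PySem.Chars.len_eq]; exact_mod_cast hjlt
    · rw [PySem.Chars.startswith_iff]
      simpa using hj

theorem vals_le_three (d : List Char) (p : Nat)
    (h : p ∈ (PySem.List.pyRange 0 (PySem.Chars.len d) 1).flatMap
        (fun i => ((kwPriority.filter
            (fun kp => PySem.Chars.startswith (d.drop i.toNat) kp.1)).map Prod.snd))) :
    p ≤ 3 := by
  obtain ⟨kw, hmem, _⟩ := (mem_flat_vals d p).mp h
  revert hmem; unfold kwPriority; intro hmem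
  fin_cases hmem <;> simp

-- ===== VERDICT (by name: the statement is the Claim_ definition above) =====
theorem categorize_dietary_type_spec : Claim_equal_categorize_dietary_type := by
  intro description _
  unfold Spec_categorize_dietary_type categorize_dietary_type categorize_dietary_type_alt
  dsimp only
  set d := (PySem.Str.lower description).toList with hd
  -- turn B's nested loop into a single min-fold over the flattened matched priorities
  have hb1 :
      (PySem.List.pyRange 0 (PySem.Chars.len d) 1).foldl
        (fun best i =>
          kwPriority.foldl
            (fun b kp => if kp.2 < b ∧ PySem.Chars.startswith (d.drop i.toNat) kp.1 then kp.2 else b)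
            best) 4
      = ((PySem.List.pyRange 0 (PySem.Chars.len d) 1).flatMap
          (fun i => ((kwPriority.filter
              (fun kp => PySem.Chars.startswith (d.drop i.toNat) kp.1)).map Prod.snd))).foldl min 4 := by
    rw [← foldl_foldl_min]
    apply PySem.List.foldl_congr_mem
    intro acc i _
    exact foldl_guarded_min kwPriority (fun kw => PySem.Chars.startswith (d.drop i.toNat) kw) acc
  rw [hb1]
  set vals := (PySem.List.pyRange 0 (PySem.Chars.len d) 1).flatMap
      (fun i => ((kwPriority.filter
          (fun kp => PySem.Chars.startswith (d.drop i.toNat) kp.1)).map Prod.snd)) with hvals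
  set best := vals.foldl min 4 with hbest
  have hmem := foldl_min_eq_or_mem vals 4
  have hle := foldl_min_le vals 4
  have hM : ∀ p : Nat, (p ∈ vals) ↔ ∃ kw, (kw, p) ∈ kwPriority ∧ PySem.Chars.isIn kw d = true :=
    fun p => mem_flat_vals d p
  -- A's any-conditions ↔ "some priority-p keyword is a substring"
  have hany : ∀ (ws : List String) (p : Nat),
      (∀ w ∈ ws, (w.toList, p) ∈ kwPriority) →
      (∀ kw : List Char, (kw, p) ∈ kwPriority → ∃ w ∈ ws, w.toList = kw) →
      ((ws.any fun word => PySem.Str.isIn word (PySem.Str.lower description)) = true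
        ↔ ∃ kw, (kw, p) ∈ kwPriority ∧ PySem.Chars.isIn kw d = true) := by
    intro ws p hsub hsup
    rw [List.any_eq_true]
    constructor
    · rintro ⟨w, hw, hin⟩
      refine ⟨w.toList, hsub w hw, ?_⟩
      rw [PySem.Str.isIn_eq] at hin
      exact hin
    · rintro ⟨kw, hmem', hin⟩
      obtain ⟨w, hw, rfl⟩ := hsup kw hmem'
      refine ⟨w, hw, ?_⟩
      rw [PySem.Str.isIn_eq]
      exact hin
  have e0 := hany ["chicken", "turkey", "beef", "pork", "lamb", "meat"] 0 (by decide)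
    (by intro kw h
        simp [kwPriority, Prod.mk.injEq] at h
        rcases h with rfl | rfl | rfl | rfl | rfl | rfl <;> decide)
  have e1 := hany ["fish", "salmon", "tuna", "shrimp", "prawn", "seafood"] 1 (by decide)
    (by intro kw h
        simp [kwPriority, Prod.mk.injEq] at h
        rcases h with rfl | rfl | rfl | rfl | rfl | rfl <;> decide)
  have e3 := hany ["milk", "cheese", "paneer", "yogurt", "butter", "cream"] 3 (by decide)
    (by intro kw h
        simp [kwPriority, Prod.mk.injEq] at h
        rcases h with rfl | rfl | rfl | rfl | rfl | rfl <;> decide)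
  have e2 : (PySem.Str.isIn "egg" (PySem.Str.lower description) = true)
      ↔ ∃ kw, (kw, 2) ∈ kwPriority ∧ PySem.Chars.isIn kw d = true := by
    constructor
    · intro hin
      refine ⟨"egg".toList, by decide, ?_⟩
      rw [PySem.Str.isIn_eq] at hin
      exact hin
    · rintro ⟨kw, hmem', hin⟩
      simp [kwPriority, Prod.mk.injEq] at hmem'
      subst hmem'
      rw [PySem.Str.isIn_eq]
      exact hin
  by_cases h0 : ∃ kw, (kw, 0) ∈ kwPriority ∧ PySem.Chars.isIn kw d = true
  · have hb : best = 0 := Nat.le_zero.mp (hle.2 0 ((hM 0).mpr h0))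
    rw [if_pos (e0.mpr h0), hb]
    rfl
  · rw [if_neg (fun hc => h0 (e0.mp hc))]
    have h0v : (0 : Nat) ∉ vals := fun h => h0 ((hM 0).mp h)
    by_cases h1 : ∃ kw, (kw, 1) ∈ kwPriority ∧ PySem.Chars.isIn kw d = true
    · have hle1 : best ≤ 1 := hle.2 1 ((hM 1).mpr h1)
      have hb : best = 1 := by
        rcases hmem with h | h
        · omega
        · have : best ≠ 0 := fun hz => h0v (hz ▸ h)
          omega
      rw [if_pos (e1.mpr h1), hb]
      rfl
    · rw [if_neg (fun hc => h1 (e1.mp hc))]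
      have h1v : (1 : Nat) ∉ vals := fun h => h1 ((hM 1).mp h)
      by_cases h2 : ∃ kw, (kw, 2) ∈ kwPriority ∧ PySem.Chars.isIn kw d = true
      · have hle2 : best ≤ 2 := hle.2 2 ((hM 2).mpr h2)
        have hb : best = 2 := by
          rcases hmem with h | h
          · omega
          · have hz0 : best ≠ 0 := fun hz => h0v (hz ▸ h)
            have hz1 : best ≠ 1 := fun hz => h1v (hz ▸ h)
            omega
        rw [if_pos (e2.mpr h2), hb]
        rfl
      · rw [if_neg (fun hc => h2 (e2.mp hc))]
        have h2v : (2 : Nat) ∉ vals := fun h => h2 ((hM 2).mp h)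
        by_cases h3 : ∃ kw, (kw, 3) ∈ kwPriority ∧ PySem.Chars.isIn kw d = true
        · have hle3 : best ≤ 3 := hle.2 3 ((hM 3).mpr h3)
          have hb : best = 3 := by
            rcases hmem with h | h
            · omega
            · have hz0 : best ≠ 0 := fun hz => h0v (hz ▸ h)
              have hz1 : best ≠ 1 := fun hz => h1v (hz ▸ h)
              have hz2 : best ≠ 2 := fun hz => h2v (hz ▸ h)
              omega
          rw [if_pos (e3.mpr h3), hb]
          rfl
        · rw [if_neg (fun hc => h3 (e3.mp hc))]
          have hb : best = 4 := by
            rcases hmem with h | h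
            · exact h
            · exfalso
              have hle3' := vals_le_three d best h
              obtain ⟨kw, hmem', hin⟩ := (hM best).mp h
              interval_cases best
              · exact h0 ⟨kw, hmem', hin⟩
              · exact h1 ⟨kw, hmem', hin⟩
              · exact h2 ⟨kw, hmem', hin⟩
              · exact h3 ⟨kw, hmem', hin⟩
          rw [hb]
          rfl
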